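-- pv_equiv track=rewrite | github.com/KrzysMur/ChordSheetWriter | src/parser_and_tex_generator.py | parse_barlines_and_chords
-- ===== SOURCE A (Python) =====
-- def parse_barlines_and_chords(line):
--     elements = []
--     bar = ""
--     for char in line:
--         if char in ["[", "]", "|"] and bar:
--             elements.append(bar)
--             bar = ""
--         match char:
--             case "[":
--                 elements.append("\\leftrepeat")
--             case "]":
--                 elements.append("\\rightrepeat")
--             case "|":
--                 elements.append("\\normalbar")
--             case "#":
--                 bar += "\\" + char
--             case _:
--                 bar += char
--     return elements
-- ===== SOURCE B (Python) =====
-- def parse_barlines_and_chords(line):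
--     # Pass 1: tokenize into (segment, delimiter) pairs; trailing text after the
--     # last delimiter is left in `cur` and (as in the original) never emitted.
--     markers = {"[": "\\leftrepeat", "]": "\\rightrepeat", "|": "\\normalbar"}
--     pairs = []
--     cur = ""
--     for ch in line:
--         if ch in markers:
--             pairs.append((cur, ch))
--             cur = ""
--         else:
--             cur += ch
--     # Pass 2: render the pairs.
--     elements = []
--     for seg, d in pairs:
--         text = "".join("\\#" if c == "#" else c for c in seg)
--         if text:
--             elements.append(text)
--         elements.append(markers[d])
--     return elements
-- ===== Notes on version B (the rewrite author's own statement) =====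
-- stated objective: idiomatic
-- what changed: Replaces A's single-pass character loop with interleaved flushing by a two-phase tokenize-then-render design: one pass splits the line into (segment, delimiter) pairs (naturally dropping the trailing segment), a second pass escapes hash characters and renders each pair via a marker dictionary.
import Mathlib
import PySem

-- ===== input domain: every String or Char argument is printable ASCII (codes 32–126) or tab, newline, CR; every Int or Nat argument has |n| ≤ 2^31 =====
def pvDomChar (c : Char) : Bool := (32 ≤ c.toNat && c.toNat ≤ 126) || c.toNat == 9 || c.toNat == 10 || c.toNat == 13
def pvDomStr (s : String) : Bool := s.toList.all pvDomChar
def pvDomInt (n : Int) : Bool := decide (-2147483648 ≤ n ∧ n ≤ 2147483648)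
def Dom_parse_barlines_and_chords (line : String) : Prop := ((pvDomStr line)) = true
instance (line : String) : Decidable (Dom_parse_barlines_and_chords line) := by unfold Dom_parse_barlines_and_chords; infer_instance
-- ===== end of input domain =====

-- B restructures A's single-pass loop (flush-on-delimiter with inline '#'-escaping)
-- into tokenize-then-render: one pass builds (segment, delimiter) pairs, a second
-- pass escapes and renders them. Objective: idiomatic; same return value everywhere.

-- ===== PORT A =====
-- one step of A's 'for char in line' loop; state = (elements, bar)
def pA_step (st : List String × List Char) (c : Char) : List String × List Char :=
  let st1 :=
    if (c = '[' ∨ c = ']' ∨ c = '|') ∧ st.2 ≠ [] then (st.1 ++ [String.ofList st.2], ([] : List Char))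
    else st
  if c = '[' then (st1.1 ++ ["\\leftrepeat"], st1.2)
  else if c = ']' then (st1.1 ++ ["\\rightrepeat"], st1.2)
  else if c = '|' then (st1.1 ++ ["\\normalbar"], st1.2)
  else if c = '#' then (st1.1, st1.2 ++ ['\\', c])
  else (st1.1, st1.2 ++ [c])

def parse_barlines_and_chords (line : String) : List String :=
  (line.toList.foldl pA_step ([], [])).1

-- ===== PORT B =====
-- the marker dict from Source B
def markersB : PySem.Dict Char String :=
  (((PySem.Dict.empty).insert '[' "\\leftrepeat").insert ']' "\\rightrepeat").insert '|' "\\normalbar"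

-- one step of B's tokenizing loop; state = (pairs, cur)
def tokB (st : List (List Char × Char) × List Char) (c : Char) : List (List Char × Char) × List Char :=
  if markersB.contains c then (st.1 ++ [(st.2, c)], ([] : List Char))
  else (st.1, st.2 ++ [c])

-- "".join("\\#" if c == "#" else c for c in seg)
def escB (seg : List Char) : List Char :=
  seg.flatMap (fun c => if c = '#' then ['\\', '#'] else [c])

-- one step of B's rendering loop
def emitB (els : List String) (p : List Char × Char) : List String :=
  let text := String.ofList (escB p.1)
  (if text ≠ "" then els ++ [text] else els) ++ [markersB.getD p.2 ""]

def parse_barlines_and_chords_alt (line : String) : List String :=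
  ((line.toList.foldl tokB ([], [])).1).foldl emitB []

-- ===== PRECONDITION & SPEC =====
def Spec_parse_barlines_and_chords (line : String) (out : List String) : Prop := out = parse_barlines_and_chords_alt line
instance (line : String) (out : List String) : Decidable (Spec_parse_barlines_and_chords line out) := by unfold Spec_parse_barlines_and_chords; infer_instance

-- ===== CLAIM (what is proved, stated in full; the proofs are below) =====
def Claim_equal_parse_barlines_and_chords : Prop := ∀ (line : String), Dom_parse_barlines_and_chords line → Spec_parse_barlines_and_chords line (parse_barlines_and_chords line)

-- ===== LEMMAS AND PROOFS =====

lemma contains_markersB (c : Char) :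
    markersB.contains c = true ↔ (c = '[' ∨ c = ']' ∨ c = '|') := by
  constructor
  · intro h
    by_contra hne
    push Not at hne
    obtain ⟨h1, h2, h3⟩ := hne
    simp [markersB, PySem.Dict.contains_insert, PySem.Dict.contains_empty, h1, h2, h3] at h
  · rintro (rfl | rfl | rfl) <;> decide

lemma escB_append (a b : List Char) : escB (a ++ b) = escB a ++ escB b := by
  simp [escB]

lemma ofList_eq_empty_iff (l : List Char) : String.ofList l = "" ↔ l = [] := by
  rw [show ("" : String) = String.ofList [] from rfl, String.ofList_inj]

-- tokB only ever appends to the pairs component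
lemma tok_pairs_shift (cs : List Char) (ps : List (List Char × Char)) (cur : List Char) :
    List.foldl tokB (ps, cur) cs
      = (ps ++ (List.foldl tokB ([], cur) cs).1, (List.foldl tokB ([], cur) cs).2) := by
  induction cs generalizing ps cur with
  | nil => simp
  | cons c cs ih =>
    simp only [List.foldl_cons, tokB]
    by_cases h : markersB.contains c
    · simp only [h, if_true, List.nil_append]
      rw [ih (ps ++ [(cur, c)]) [], ih [(cur, c)] []]
      simp
    · simp only [h, if_false]
      exact ih ps (cur ++ [c])

-- main invariant: A's loop from (els, escB cur) computes B's render of B's tokens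
lemma main_inv (cs : List Char) (els : List String) (cur : List Char) :
    (List.foldl pA_step (els, escB cur) cs).1
      = List.foldl emitB els (List.foldl tokB ([], cur) cs).1 := by
  induction cs generalizing els cur with
  | nil => simp
  | cons c cs ih =>
    simp only [List.foldl_cons]
    by_cases hd : c = '[' ∨ c = ']' ∨ c = '|'
    · have hc : markersB.contains c = true := (contains_markersB c).mpr hd
      rw [tokB, if_pos hc]
      simp only [List.nil_append]
      rw [tok_pairs_shift cs [(cur, c)] []]
      simp only [List.foldl_append, List.foldl_cons, List.foldl_nil]
      have hg1 : markersB.getD '[' "" = "\\leftrepeat" := by decide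
      have hg2 : markersB.getD ']' "" = "\\rightrepeat" := by decide
      have hg3 : markersB.getD '|' "" = "\\normalbar" := by decide
      have hemit : pA_step (els, escB cur) c = (emitB els (cur, c), ([] : List Char)) := by
        by_cases hb : escB cur = []
        · have ht : String.ofList (escB cur) = "" := (ofList_eq_empty_iff _).mpr hb
          rcases hd with rfl | rfl | rfl <;>
            simp [pA_step, emitB, hb, hg1, hg2, hg3]
        · have ht : ¬ String.ofList (escB cur) = "" := fun h => hb ((ofList_eq_empty_iff _).mp h)
          rcases hd with rfl | rfl | rfl <;>
            simp [pA_step, emitB, hb, ht, hg1, hg2, hg3]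
      rw [hemit]
      simpa [escB] using ih (emitB els (cur, c)) []
    · have hc : ¬ markersB.contains c = true := fun h => hd ((contains_markersB c).mp h)
      rw [tokB, if_neg hc]
      push Not at hd
      obtain ⟨h1, h2, h3⟩ := hd
      have hstep : pA_step (els, escB cur) c = (els, escB (cur ++ [c])) := by
        rw [escB_append]
        by_cases h4 : c = '#' <;>
          simp [pA_step, h1, h2, h3, h4, escB]
      rw [hstep, ih]

-- ===== VERDICT (by name: the statement is the Claim_ definition above) =====
theorem parse_barlines_and_chords_spec : Claim_equal_parse_barlines_and_chords := by
  intro line _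
  unfold Spec_parse_barlines_and_chords parse_barlines_and_chords parse_barlines_and_chords_alt
  simpa [escB] using main_inv line.toList [] []
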